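-- pv_equiv track=rewrite | github.com/brookec123/CommentFixer | auto-file-and-function-comments/Python/python_comments.py | remove_previous_comments
-- ===== SOURCE A (Python) =====
-- from typing import List
--
-- def remove_previous_comments(lines: List[str]) -> List[str]:
--     new_lines = []
--     insideComment = False
--     for line in lines:
--         if line.lstrip().startswith("\'\'\'") or line.lstrip().startswith("\"\"\""):
--             insideComment = not insideComment
--         elif not insideComment and not line.lstrip().startswith("#"):
--             new_lines.append(line)
--     return new_lines
-- ===== SOURCE B (Python) =====
-- from typing import List
--
-- def remove_previous_comments(lines: List[str]) -> List[str]: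
--     # Block-skipping scan: no insideComment flag; a delimiter line causes the
--     # whole docstring block (through its closing delimiter) to be skipped at once.
--     out = []
--     i = 0
--     n = len(lines)
--     while i < n:
--         stripped = lines[i].lstrip()
--         if stripped.startswith("'''") or stripped.startswith('"""'):
--             i += 1  # opening delimiter
--             while i < n:
--                 s = lines[i].lstrip()
--                 i += 1
--                 if s.startswith("'''") or s.startswith('"""'):
--                     break  # closing delimiter consumed
--         else:
--             if not stripped.startswith("#"):
--                 out.append(lines[i])
--             i += 1
--     return out
-- ===== Notes on version B (the rewrite author's own statement) =====
-- stated objective: alternative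
-- what changed: Removes the insideComment parity flag entirely: a block-skipping scan that, on a docstring delimiter, advances wholesale past the whole block to its closing delimiter, and otherwise filters '#' lines.
import Mathlib
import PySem

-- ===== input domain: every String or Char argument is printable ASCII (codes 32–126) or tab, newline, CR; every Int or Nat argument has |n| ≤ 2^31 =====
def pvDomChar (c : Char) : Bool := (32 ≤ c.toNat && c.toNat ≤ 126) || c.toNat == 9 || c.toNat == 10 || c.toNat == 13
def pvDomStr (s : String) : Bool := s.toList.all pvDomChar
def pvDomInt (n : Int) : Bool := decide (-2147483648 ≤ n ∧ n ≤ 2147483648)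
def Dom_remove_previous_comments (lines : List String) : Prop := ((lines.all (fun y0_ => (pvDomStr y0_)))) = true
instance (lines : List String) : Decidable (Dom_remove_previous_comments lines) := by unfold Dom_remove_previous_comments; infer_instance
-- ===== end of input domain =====

-- ===== PORT A =====
-- B drops A's insideComment parity flag for a block-skipping scan (alternative decomposition).
-- Port of A: the for-loop over `lines` with state `insideComment`, as structural recursion.
def rpcLoop (lines : List String) (insideComment : Bool) : List String :=
  match lines with
  | [] => []
  | line :: rest =>
    let ls := PySem.Str.lstrip line
    if PySem.Str.startswith ls "'''" || PySem.Str.startswith ls "\"\"\"" then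
      rpcLoop rest (!insideComment)
    else if !insideComment && !(PySem.Str.startswith ls "#") then
      line :: rpcLoop rest insideComment
    else
      rpcLoop rest insideComment

def remove_previous_comments (lines : List String) : List String :=
  rpcLoop lines false

-- ===== PORT B =====
-- B's delimiter test: does the stripped line start with a docstring delimiter?
def rpcDelim (l : String) : Bool :=
  PySem.Str.startswith (PySem.Str.lstrip l) "'''" ||
  PySem.Str.startswith (PySem.Str.lstrip l) "\"\"\""

-- Two-mode scan: `rpcOutside` is B's outer while-loop body, `rpcSkip` its inner
-- block-skipping while-loop (consume lines up to and including the closing delimiter).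
mutual
  def rpcOutside : List String → List String
    | [] => []
    | l :: rest =>
      if rpcDelim l then rpcSkip rest
      else if PySem.Str.startswith (PySem.Str.lstrip l) "#" then rpcOutside rest
      else l :: rpcOutside rest
  def rpcSkip : List String → List String
    | [] => []
    | l :: rest =>
      if rpcDelim l then rpcOutside rest
      else rpcSkip rest
end

def remove_previous_comments_alt (lines : List String) : List String :=
  rpcOutside lines

-- ===== PRECONDITION & SPEC =====
def Spec_remove_previous_comments (lines : List String) (out : List String) : Prop := out = remove_previous_comments_alt lines
instance (lines : List String) (out : List String) : Decidable (Spec_remove_previous_comments lines out) := by unfold Spec_remove_previous_comments; infer_instance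

-- ===== CLAIM (what is proved, stated in full; the proofs are below) =====
def Claim_equal_remove_previous_comments : Prop := ∀ (lines : List String), Dom_remove_previous_comments lines → Spec_remove_previous_comments lines (remove_previous_comments lines)

-- ===== LEMMAS AND PROOFS =====
-- A's delimiter condition is definitionally B's `rpcDelim`.
lemma rpcDelim_eq (l : String) :
    (PySem.Str.startswith (PySem.Str.lstrip l) "'''" ||
     PySem.Str.startswith (PySem.Str.lstrip l) "\"\"\"") = rpcDelim l := rfl

-- A's loop with state `false` is B's outside mode; with state `true`, B's skip mode.
lemma rpcLoop_eq_modes (lines : List String) :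
    rpcLoop lines false = rpcOutside lines ∧ rpcLoop lines true = rpcSkip lines := by
  induction lines with
  | nil => exact ⟨rfl, rfl⟩
  | cons l rest ih =>
    refine ⟨?_, ?_⟩
    · simp only [rpcLoop, rpcOutside, rpcDelim_eq, Bool.not_false, Bool.true_and]
      by_cases hd : rpcDelim l = true
      · rw [if_pos hd, if_pos hd, ih.2]
      · rw [if_neg hd, if_neg hd]
        by_cases hh : PySem.Str.startswith (PySem.Str.lstrip l) "#" = true
        · rw [if_pos hh, if_neg (by simpa using hh), ih.1]
        · rw [if_neg hh, if_pos (by simp at hh; simp [hh]), ih.1]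
    · simp only [rpcLoop, rpcSkip, rpcDelim_eq, Bool.not_true, Bool.false_and]
      by_cases hd : rpcDelim l = true
      · rw [if_pos hd, if_pos hd, ih.1]
      · rw [if_neg hd, if_neg hd, if_neg (by simp), ih.2]

-- ===== VERDICT (by name: the statement is the Claim_ definition above) =====
theorem remove_previous_comments_spec : Claim_equal_remove_previous_comments := by
  intro lines _
  exact (rpcLoop_eq_modes lines).1
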